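-- pv_equiv track=rewrite | github.com/dorianDraper/DGA-Detection-final | src/app.py | longest_consonant_string
-- ===== SOURCE A (Python) =====
-- def longest_consonant_string(host):
--     consonants = 'bcdfghjklmnpqrstvwxyzBCDFGHJKLMNPQRSTVWXYZ'
--     max_length = 0
--     current_length = 0
--     for char in host:
--         if char in consonants:
--             current_length += 1
--             max_length = max(max_length, current_length)
--         else:
--             current_length = 0
--     return max_length
-- ===== SOURCE B (Python) =====
-- def longest_consonant_string(host):
--     consonants = set('bcdfghjklmnpqrstvwxyzBCDFGHJKLMNPQRSTVWXYZ')
--     runs = []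
--     i = 0
--     n = len(host)
--     while i < n:
--         if host[i] in consonants:
--             j = i
--             while j < n and host[j] in consonants:
--                 j += 1
--             runs.append(j - i)
--             i = j
--         else:
--             i += 1
--     return max(runs, default=0)
-- ===== Notes on version B (the rewrite author's own statement) =====
-- stated objective: alternative
-- what changed: Replaces the running-counter/running-max single pass with a two-level scan that extracts each maximal consonant run, collects the run lengths into a list, and reduces with max(..., default=0).
import Mathlib
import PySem

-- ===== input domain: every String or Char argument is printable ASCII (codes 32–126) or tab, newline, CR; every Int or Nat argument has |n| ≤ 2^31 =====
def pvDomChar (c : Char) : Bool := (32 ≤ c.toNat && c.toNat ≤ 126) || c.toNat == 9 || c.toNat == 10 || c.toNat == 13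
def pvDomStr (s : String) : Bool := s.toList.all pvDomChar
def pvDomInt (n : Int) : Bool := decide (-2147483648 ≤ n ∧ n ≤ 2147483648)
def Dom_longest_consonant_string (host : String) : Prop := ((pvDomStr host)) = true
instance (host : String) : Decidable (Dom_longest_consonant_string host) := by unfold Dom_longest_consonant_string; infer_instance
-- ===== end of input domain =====

-- B extracts every maximal consonant run and reduces the run lengths with max (alternative decomposition, same O(n) cost).

-- ===== PORT A =====
-- A: single pass with a running current-length counter and a running max.
def longest_consonant_string (host : String) : Int :=
  let consonants := "bcdfghjklmnpqrstvwxyzBCDFGHJKLMNPQRSTVWXYZ"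
  (host.toList.foldl
    (fun (st : Int × Int) char =>
      if consonants.toList.contains char then
        (max st.1 (st.2 + 1), st.2 + 1)
      else
        (st.1, 0))
    (0, 0)).1

-- ===== PORT B =====
-- B's consonant set (Source B builds it with set(...)).
def pvConsSet : PySem.Set Char :=
  PySem.Set.ofList "bcdfghjklmnpqrstvwxyzBCDFGHJKLMNPQRSTVWXYZ".toList

def pvIsConsB (c : Char) : Bool := PySem.Set.contains pvConsSet c

-- B's outer loop: each maximal consonant run is scanned off in one go (the inner
-- index scan `while j < n and host[j] in consonants` is the takeWhile, advancing
-- i to j is the dropWhile); non-consonant characters are skipped one at a time.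
def pvRuns : List Char → List Int
  | [] => []
  | c :: rest =>
    if h : pvIsConsB c then
      (((c :: rest).takeWhile pvIsConsB).length : Int)
        :: pvRuns ((c :: rest).dropWhile pvIsConsB)
    else
      pvRuns rest
termination_by l => l.length
decreasing_by
  · simp [h]
    exact List.length_dropWhile_le _ _
  · simp

def longest_consonant_string_alt (host : String) : Int :=
  (pvRuns host.toList).foldl max 0  -- max(runs, default=0)

-- ===== PRECONDITION & SPEC =====
def Spec_longest_consonant_string (host : String) (out : Int) : Prop := out = longest_consonant_string_alt host
instance (host : String) (out : Int) : Decidable (Spec_longest_consonant_string host out) := by unfold Spec_longest_consonant_string; infer_instance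

-- ===== CLAIM (what is proved, stated in full; the proofs are below) =====
def Claim_equal_longest_consonant_string : Prop := ∀ (host : String), Dom_longest_consonant_string host → Spec_longest_consonant_string host (longest_consonant_string host)

-- ===== LEMMAS AND PROOFS =====

-- Common reference function: pvG c l = the length of the longest consonant run in l,
-- where a run of length c is already in progress at the start of l.
def pvG (c : Int) : List Char → Int
  | [] => c
  | x :: xs => if pvIsConsB x then pvG (c + 1) xs else max c (pvG 0 xs)

theorem pvG_ge (l : List Char) : ∀ c : Int, 0 ≤ c → c ≤ pvG c l := by
  induction l with
  | nil => intro c _; exact le_refl _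
  | cons x xs ih =>
    intro c hc
    simp only [pvG]
    split
    · have := ih (c + 1) (by omega); omega
    · exact le_max_left _ _

-- A's membership test (substring `in` on the literal) agrees with B's set membership.
set_option maxRecDepth 8000 in
theorem pvMemEq (ch : Char) :
    ("bcdfghjklmnpqrstvwxyzBCDFGHJKLMNPQRSTVWXYZ".toList.contains ch) = pvIsConsB ch := by
  have h : pvConsSet = "bcdfghjklmnpqrstvwxyzBCDFGHJKLMNPQRSTVWXYZ".toList := by decide
  simp [pvIsConsB, h]

-- A's fold with state (max so far, current run) computes max m (pvG c l).
theorem pvFoldA (l : List Char) : ∀ m c : Int, 0 ≤ c → c ≤ m →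
    (List.foldl
      (fun (st : Int × Int) char =>
        if "bcdfghjklmnpqrstvwxyzBCDFGHJKLMNPQRSTVWXYZ".toList.contains char then
          (max st.1 (st.2 + 1), st.2 + 1)
        else
          (st.1, 0)) (m, c) l).1 = max m (pvG c l) := by
  induction l with
  | nil => intro m c _ hcm; simp [pvG]; omega
  | cons x xs ih =>
    intro m c hc hcm
    simp only [List.foldl, pvMemEq x, pvG]
    by_cases h : pvIsConsB x
    · simp only [h, if_true]
      rw [ih (max m (c + 1)) (c + 1) (by omega) (le_max_right _ _)]
      have := pvG_ge xs (c + 1) (by omega)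
      omega
    · simp only [h, Bool.false_eq_true, if_false]
      rw [ih m 0 (le_refl _) (by omega)]
      have := pvG_ge xs 0 (le_refl _)
      omega

-- Splitting pvG at the first maximal run.
theorem pvG_split (l : List Char) : ∀ c : Int, 0 ≤ c →
    pvG c l = max (c + ((l.takeWhile pvIsConsB).length : Int))
                  (pvG 0 (l.dropWhile pvIsConsB)) := by
  induction l with
  | nil => intro c hc; simp [pvG]; omega
  | cons x xs ih =>
    intro c hc
    by_cases h : pvIsConsB x
    · simp only [pvG, h, if_true, List.takeWhile_cons, List.dropWhile_cons]
      rw [ih (c + 1) (by omega)]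
      simp only [List.length_cons]
      push_cast
      omega
    · have := pvG_ge xs 0 (le_refl _)
      simp only [pvG, h, Bool.false_eq_true, if_false, List.takeWhile_cons,
        List.dropWhile_cons, List.length_nil]
      push_cast
      omega

theorem pvFoldMax (xs : List Int) : ∀ a b : Int,
    List.foldl max (max a b) xs = max a (List.foldl max b xs) := by
  induction xs with
  | nil => intro a b; rfl
  | cons x xs ih =>
    intro a b
    simp only [List.foldl, max_assoc, ih]

-- B's result equals pvG 0 (strong induction on the list length, following pvRuns's recursion).
theorem pvRunsFoldAux : ∀ (n : Nat) (l : List Char), l.length ≤ n →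
    List.foldl max 0 (pvRuns l) = pvG 0 l := by
  intro n
  induction n with
  | zero =>
    intro l hl
    cases l with
    | nil => rw [pvRuns.eq_def]; rfl
    | cons c rest => simp at hl
  | succ n ih =>
    intro l hl
    cases l with
    | nil => rw [pvRuns.eq_def]; rfl
    | cons c rest =>
      by_cases h : pvIsConsB c
      · have hru : pvRuns (c :: rest)
            = (((c :: rest).takeWhile pvIsConsB).length : Int)
                :: pvRuns ((c :: rest).dropWhile pvIsConsB) := by
          rw [pvRuns.eq_def]
          simp [h]
        have hlen : ((c :: rest).dropWhile pvIsConsB).length ≤ n := by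
          simp only [List.dropWhile_cons, h, if_true]
          exact le_trans (List.length_dropWhile_le _ _)
            (by simpa using Nat.succ_le_succ_iff.mp hl)
        rw [hru]
        simp only [List.foldl]
        rw [max_comm, pvFoldMax, ih _ hlen, pvG_split (c :: rest) 0 (le_refl _)]
        omega
      · have hru : pvRuns (c :: rest) = pvRuns rest := by
          rw [pvRuns.eq_def]
          simp [h]
        have := pvG_ge rest 0 (le_refl _)
        rw [hru, ih rest (by simpa using Nat.succ_le_succ_iff.mp hl)]
        simp only [pvG, h, Bool.false_eq_true, if_false]
        omega

theorem pvRunsFold (l : List Char) : List.foldl max 0 (pvRuns l) = pvG 0 l :=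
  pvRunsFoldAux l.length l (le_refl _)

-- ===== VERDICT (by name: the statement is the Claim_ definition above) =====
theorem longest_consonant_string_spec : Claim_equal_longest_consonant_string := by
  intro host _
  unfold Spec_longest_consonant_string longest_consonant_string longest_consonant_string_alt
  rw [pvRunsFold, pvFoldA host.toList 0 0 (le_refl _) (le_refl _)]
  have := pvG_ge host.toList 0 (le_refl _)
  omega
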